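-- pv_equiv track=rewrite | github.com/MinikPLayer/MasterThesis_UniversalRenderingModule_D3D11 | diagrams/genUmlFromLib.py | shorten_params
-- ===== SOURCE A (Python) =====
-- def split_params(line: str) -> list[str]:
--     params = [""]
--     sharp_bracket_stack = 0
--     for l in line:
--         if l == '<':
--             sharp_bracket_stack += 1
--         elif l == '>':
--             sharp_bracket_stack -= 1
--
--         if l == ',' and sharp_bracket_stack == 0:
--             params.append("")
--         else:
--             params[-1] += l
--
--     return [param.strip() for param in params if param.strip()]
--
-- def shorten_params(line: str) -> str:
--     start_index = line.find("(")
--     end_index = line.find(")", start_index)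
--     if start_index == -1 or end_index == -1:
--         return line
--
--     params = split_params(line[start_index + 1:end_index].strip())
--     shortened_params = []
--     for param in params:
--         param = param.strip()
--         if param == "":
--             continue
--
--         shortened_param = param.split()[-1]  # Take the last part of the parameter (type)
--         shortened_params.append(shortened_param)
--
--     shortened_params_str = ", ".join(shortened_params)
--     return line[:start_index + 1] + shortened_params_str + line[end_index:]
-- ===== SOURCE B (Python) =====
-- def shorten_params(line: str) -> str:
--     start_index = line.find("(")
--     end_index = line.find(")", start_index)
--     if start_index == -1 or end_index == -1:
--         return line
--
--     inner = line[start_index + 1:end_index].strip()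
--     out = []
--     depth = 0
--     cur = ""    # whitespace-delimited token currently being read
--     last = ""   # last completed token of the current parameter ("" = none yet)
--     for c in inner:
--         if c == '<':
--             depth += 1
--         elif c == '>':
--             depth -= 1
--         if c == ',' and depth == 0:
--             if cur:
--                 last = cur
--             if last:
--                 out.append(last)
--             cur = ""
--             last = ""
--         elif c.isspace():
--             if cur:
--                 last = cur
--             cur = ""
--         else:
--             cur += c
--     if cur:
--         last = cur
--     if last:
--         out.append(last)
--
--     return line[:start_index + 1] + ", ".join(out) + line[end_index:]
-- ===== Notes on version B (the rewrite author's own statement) =====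
-- stated objective: alternative
-- what changed: B replaces A's two-phase pipeline (accumulate whole parameter strings with a bracket-depth splitter, then strip/split each and take its last token) by a single character pass over the parenthesised interior that keeps only an angle-bracket depth, the token being read and the last completed token, emitting one token per depth-0 comma segment.
import Mathlib
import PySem

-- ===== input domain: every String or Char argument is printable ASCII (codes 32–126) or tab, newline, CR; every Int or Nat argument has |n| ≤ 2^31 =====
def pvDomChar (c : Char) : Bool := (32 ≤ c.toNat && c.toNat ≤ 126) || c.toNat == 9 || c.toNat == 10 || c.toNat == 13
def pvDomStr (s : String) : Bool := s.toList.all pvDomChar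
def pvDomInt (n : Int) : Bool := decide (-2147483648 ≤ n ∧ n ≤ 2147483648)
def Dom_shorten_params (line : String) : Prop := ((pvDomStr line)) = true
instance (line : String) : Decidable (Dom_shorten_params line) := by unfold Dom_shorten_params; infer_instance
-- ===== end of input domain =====

-- B replaces A's two-phase pipeline (split params by depth-0 commas, then strip/split each and keep
-- the last token) by one character pass tracking only the current and last token; objective: alternative.

-- ===== PORT A =====
-- split_params' loop; the growing list `params` is kept as (done params, params[-1]) = (done, cur)
def pvSplitLoop : List Char → List (List Char) → List Char → Int → List (List Char) × List Char
  | [], done, cur, _ => (done, cur)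
  | c :: rest, done, cur, depth =>
      let d := if c = '<' then depth + 1 else if c = '>' then depth - 1 else depth
      if c = ',' ∧ d = 0 then pvSplitLoop rest (done ++ [cur]) [] d
      else pvSplitLoop rest done (cur ++ [c]) d

-- split_params: [param.strip() for param in params if param.strip()]
def pvSplitParams (s : List Char) : List (List Char) :=
  let r := pvSplitLoop s [] [] 0
  ((r.1 ++ [r.2]).map PySem.Chars.strip).filter (fun p => !p.isEmpty)

-- the shortening loop of shorten_params; param.split()[-1] is pyGet? … (-1); the .getD [] default
-- is unreachable (param is nonempty after strip, so its split() is nonempty)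
def pvShortenA (params : List (List Char)) : List (List Char) :=
  params.foldl (fun acc param =>
    let p := PySem.Chars.strip param
    if p.isEmpty then acc
    else acc ++ [(PySem.List.pyGet? (PySem.Chars.split₀ p) (-1)).getD []]) []

def shorten_params (line : String) : String :=
  let cs := line.toList
  let start := PySem.Chars.find cs ['(']
  let stop := PySem.Chars.findFrom cs [')'] start none
  if start = -1 ∨ stop = -1 then line
  else
    let params := pvSplitParams (PySem.Chars.strip (PySem.List.slice cs (some (start + 1)) (some stop)))
    String.ofList (PySem.List.slice cs none (some (start + 1)) ++
      PySem.Chars.join [',', ' '] (pvShortenA params) ++ PySem.List.slice cs (some stop) none)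

-- ===== PORT B =====
-- B's single pass: state = (depth, token being read, last completed token, emitted tokens)
def pvAltLoop : List Char → Int → List Char → List Char → List (List Char) → List (List Char)
  | [], _, cur, last, out =>
      let l := if cur.isEmpty then last else cur
      if l.isEmpty then out else out ++ [l]
  | c :: rest, depth, cur, last, out =>
      let d := if c = '<' then depth + 1 else if c = '>' then depth - 1 else depth
      if c = ',' ∧ d = 0 then
        let l := if cur.isEmpty then last else cur
        pvAltLoop rest d [] [] (if l.isEmpty then out else out ++ [l])
      else if PySem.Chars.isspace c then
        pvAltLoop rest d [] (if cur.isEmpty then last else cur) out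
      else pvAltLoop rest d (cur ++ [c]) last out

def shorten_params_alt (line : String) : String :=
  let cs := line.toList
  let start := PySem.Chars.find cs ['(']
  let stop := PySem.Chars.findFrom cs [')'] start none
  if start = -1 ∨ stop = -1 then line
  else
    let inner := PySem.Chars.strip (PySem.List.slice cs (some (start + 1)) (some stop))
    String.ofList (PySem.List.slice cs none (some (start + 1)) ++
      PySem.Chars.join [',', ' '] (pvAltLoop inner 0 [] [] []) ++ PySem.List.slice cs (some stop) none)

-- ===== PRECONDITION & SPEC =====
def Spec_shorten_params (line : String) (out : String) : Prop := out = shorten_params_alt line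
instance (line : String) (out : String) : Decidable (Spec_shorten_params line out) := by unfold Spec_shorten_params; infer_instance

-- ===== CLAIM (what is proved, stated in full; the proofs are below) =====
def Claim_equal_shorten_params : Prop := ∀ (line : String), Dom_shorten_params line → Spec_shorten_params line (shorten_params line)

-- ===== LEMMAS AND PROOFS =====

-- non-space predicate, reference word splitter, and the trailing-token decomposition
def pvNsp (c : Char) : Bool := !PySem.Chars.isspace c

def pvWords : List Char → List (List Char)
  | [] => []
  | c :: s =>
    if PySem.Chars.isspace c then pvWords s
    else (c :: s.takeWhile pvNsp) :: pvWords (s.dropWhile pvNsp)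
  termination_by s => s.length
  decreasing_by
  · simp
  · have := List.length_dropWhile_le pvNsp s; simp; omega

def pvTrail (s : List Char) : List Char := (s.reverse.takeWhile pvNsp).reverse
def pvDropTrail (s : List Char) : List Char := (s.reverse.dropWhile pvNsp).reverse

-- the value A contributes for one raw parameter string
def pvF (p : List Char) : List (List Char) :=
  if pvWords p = [] then [] else [(pvWords p).getLastD []]

-- ---- split₀ = pvWords ----
theorem pvGo_nil (cur : List Char) (acc : List (List Char)) :
    PySem.Chars.split₀.go [] cur acc = if cur.isEmpty then acc.reverse else (cur.reverse :: acc).reverse := by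
  simp [PySem.Chars.split₀.go]

theorem pvGo_cons_sp (c : Char) (rest cur : List Char) (acc : List (List Char))
    (h : PySem.Chars.isspace c = true) :
    PySem.Chars.split₀.go (c :: rest) cur acc =
      PySem.Chars.split₀.go rest [] (if cur.isEmpty then acc else cur.reverse :: acc) := by
  simp [PySem.Chars.split₀.go, h]; split <;> simp

theorem pvGo_cons_ns (c : Char) (rest cur : List Char) (acc : List (List Char))
    (h : PySem.Chars.isspace c = false) :
    PySem.Chars.split₀.go (c :: rest) cur acc = PySem.Chars.split₀.go rest (c :: cur) acc := by
  simp [PySem.Chars.split₀.go, h]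

theorem pvGoWord (u : List Char) (hu : ∀ c ∈ u, pvNsp c = true) (v rcur : List Char) (acc : List (List Char)) :
    PySem.Chars.split₀.go (u ++ v) rcur acc = PySem.Chars.split₀.go v (u.reverse ++ rcur) acc := by
  induction u generalizing rcur with
  | nil => simp
  | cons c u ih =>
      have hc : PySem.Chars.isspace c = false := by
        have := hu c (by simp); simpa [pvNsp] using this
      rw [List.cons_append, pvGo_cons_ns _ _ _ _ hc, ih (fun d hd => hu d (by simp [hd]))]
      simp

theorem pvHeadDrop (p : Char → Bool) (l : List Char) (d : Char) (r : List Char)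
    (h : l.dropWhile p = d :: r) : p d = false := by
  induction l with
  | nil => simp at h
  | cons c t ih =>
      by_cases hc : p c
      · rw [List.dropWhile_cons_of_pos hc] at h; exact ih h
      · rw [List.dropWhile_cons_of_neg hc] at h
        cases h; simpa using hc

theorem pvWords_nil : pvWords [] = [] := by simp [pvWords]

theorem pvWords_cons_sp (c : Char) (s : List Char) (h : PySem.Chars.isspace c = true) :
    pvWords (c :: s) = pvWords s := by rw [pvWords]; simp [h]

theorem pvWords_cons_ns (c : Char) (s : List Char) (h : PySem.Chars.isspace c = false) :
    pvWords (c :: s) = (c :: s.takeWhile pvNsp) :: pvWords (s.dropWhile pvNsp) := by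
  rw [pvWords]; simp [h]

theorem pvSplit0Go : ∀ n (s : List Char), s.length ≤ n → ∀ acc,
    PySem.Chars.split₀.go s [] acc = acc.reverse ++ pvWords s := by
  intro n
  induction n with
  | zero =>
      intro s hs acc
      have : s = [] := List.eq_nil_of_length_eq_zero (Nat.le_zero.1 hs)
      subst this; simp [pvGo_nil, pvWords_nil]
  | succ n ih =>
      intro s hs acc
      cases s with
      | nil => simp [pvGo_nil, pvWords_nil]
      | cons c t =>
          by_cases hc : PySem.Chars.isspace c = true
          · rw [pvGo_cons_sp _ _ _ _ hc]
            simp only [List.isEmpty_nil, if_true]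
            rw [ih t (by simpa using Nat.lt_succ_iff.1 (by simpa using hs)) acc,
              pvWords_cons_sp _ _ hc]
          · have hc' : PySem.Chars.isspace c = false := by simpa using hc
            rw [pvGo_cons_ns _ _ _ _ hc']
            have ht : t = t.takeWhile pvNsp ++ t.dropWhile pvNsp :=
              (List.takeWhile_append_dropWhile).symm
            have htw : ∀ d ∈ t.takeWhile pvNsp, pvNsp d = true :=
              fun d hd => List.all_eq_true.mp List.all_takeWhile d hd
            have ht : t.takeWhile pvNsp ++ t.dropWhile pvNsp = t :=
              List.takeWhile_append_dropWhile
            conv_lhs => rw [← ht]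
            rw [pvGoWord _ htw]
            have hlen : t.length ≤ n := by
              have := hs; simp at this; omega
            cases hd : t.dropWhile pvNsp with
            | nil =>
                rw [pvGo_nil, pvWords_cons_ns _ _ hc', hd, pvWords_nil]
                simp
            | cons d v =>
                have hdsp : PySem.Chars.isspace d = true := by
                  have := pvHeadDrop pvNsp t d v hd; simpa [pvNsp] using this
                rw [pvGo_cons_sp _ _ _ _ hdsp]
                have hvlen : v.length ≤ n := by
                  have h1 : (t.dropWhile pvNsp).length ≤ t.length := List.length_dropWhile_le _ _
                  rw [hd] at h1; simp at h1; omega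
                rw [show (((t.takeWhile pvNsp).reverse ++ [c]).isEmpty) = false by simp]
                simp only [Bool.false_eq_true, if_false]
                rw [ih v hvlen]
                rw [pvWords_cons_ns _ _ hc', hd, pvWords_cons_sp _ _ hdsp]
                simp

theorem pvSplit0_eq (s : List Char) : PySem.Chars.split₀ s = pvWords s := by
  have := pvSplit0Go s.length s le_rfl []
  simpa [PySem.Chars.split₀] using this

-- ---- pvWords structural lemmas ----
theorem pvWords_nil_iff (s : List Char) : pvWords s = [] ↔ ∀ c ∈ s, PySem.Chars.isspace c = true := by
  induction s using pvWords.induct with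
  | case1 => simp [pvWords_nil]
  | case2 c s h ih => rw [pvWords_cons_sp _ _ h]; simp [ih, h]
  | case3 c s h ih =>
      have hc : PySem.Chars.isspace c = false := by simpa using h
      rw [pvWords_cons_ns _ _ hc]
      simp [hc]

theorem pvWords_ne_nil (s : List Char) (w : List Char) (h : w ∈ pvWords s) : w ≠ [] := by
  induction s using pvWords.induct with
  | case1 => rw [pvWords_nil] at h; simp at h
  | case2 c s hc ih => rw [pvWords_cons_sp _ _ hc] at h; exact ih h
  | case3 c s hc ih =>
      rw [pvWords_cons_ns _ _ (by simpa using hc)] at h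
      rcases List.mem_cons.1 h with h1 | h1
      · subst h1; simp
      · exact ih h1

theorem pvTw_append_nil {p : Char → Bool} {a b : List Char} (h : (a ++ b).takeWhile p = []) :
    a.takeWhile p = [] := by
  rw [List.takeWhile_append] at h
  split at h
  · rcases List.append_eq_nil_iff.1 h with ⟨rfl, -⟩; simp
  · exact h

theorem pvTake_sp_nil (t : List Char) (ht : ∀ c ∈ t, PySem.Chars.isspace c = true) :
    t.takeWhile pvNsp = [] := by
  cases t with
  | nil => simp
  | cons d r =>
      have := ht d (by simp)
      simp [pvNsp, this]

theorem pvDrop_sp_self (t : List Char) (ht : ∀ c ∈ t, PySem.Chars.isspace c = true) :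
    t.dropWhile pvNsp = t := by
  cases t with
  | nil => simp
  | cons d r =>
      have := ht d (by simp)
      simp [pvNsp, this]

theorem pvWords_append_sp (s t : List Char) (ht : ∀ c ∈ t, PySem.Chars.isspace c = true) :
    pvWords (s ++ t) = pvWords s := by
  induction s using pvWords.induct with
  | case1 =>
      simp only [List.nil_append, pvWords_nil]
      exact (pvWords_nil_iff t).2 ht
  | case2 c s h ih =>
      rw [List.cons_append, pvWords_cons_sp _ _ h, pvWords_cons_sp _ _ h, ih]
  | case3 c s h ih =>
      have hc : PySem.Chars.isspace c = false := by simpa using h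
      rw [List.cons_append, pvWords_cons_ns _ _ hc, pvWords_cons_ns _ _ hc]
      cases hd : s.dropWhile pvNsp with
      | nil =>
          have hall : ∀ x ∈ s, pvNsp x = true := List.dropWhile_eq_nil_iff.1 hd
          have htt : s.takeWhile pvNsp = s := by
            have h2 := List.takeWhile_append_dropWhile (p := pvNsp) (l := s)
            rw [hd] at h2; simpa using h2
          have htw : (s ++ t).takeWhile pvNsp = s ++ t.takeWhile pvNsp := by
            rw [List.takeWhile_append, if_pos (by rw [htt])]
          have hdw : (s ++ t).dropWhile pvNsp = t.dropWhile pvNsp := by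
            rw [List.dropWhile_append, if_pos (by rw [hd]; simp)]
          rw [htw, pvTake_sp_nil t ht, hdw, pvDrop_sp_self t ht, htt]
          simp [pvWords_nil, (pvWords_nil_iff t).2 ht]
      | cons d r =>
          have hlen : ¬ ((s.takeWhile pvNsp).length = s.length) := by
            intro hlen
            have hpre : s.takeWhile pvNsp <+: s := List.takeWhile_prefix _
            have : s.takeWhile pvNsp = s := List.IsPrefix.eq_of_length hpre hlen
            have h2 := List.takeWhile_append_dropWhile (p := pvNsp) (l := s)
            rw [this, hd] at h2
            have := List.append_cancel_left (h2.trans (List.append_nil s).symm)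
            simp at this
          have htw : (s ++ t).takeWhile pvNsp = s.takeWhile pvNsp := by
            rw [List.takeWhile_append, if_neg hlen]
          have hdw : (s ++ t).dropWhile pvNsp = s.dropWhile pvNsp ++ t := by
            rw [List.dropWhile_append, if_neg (by rw [hd]; simp)]
          rw [htw, hdw, ih, hd]

theorem pvWord_of_all (s : List Char) (hne : s ≠ []) (h : ∀ c ∈ s, pvNsp c = true) :
    pvWords s = [s] := by
  cases s with
  | nil => simp at hne
  | cons c t =>
      have hc : PySem.Chars.isspace c = false := by
        have := h c (by simp); simpa [pvNsp] using this
      have hdt : t.dropWhile pvNsp = [] := List.dropWhile_eq_nil_iff.2 (fun x hx => h x (by simp [hx]))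
      have htt : t.takeWhile pvNsp = t := by
        have h2 := List.takeWhile_append_dropWhile (p := pvNsp) (l := t)
        rw [hdt] at h2; simpa using h2
      rw [pvWords_cons_ns _ _ hc, hdt, htt, pvWords_nil]

theorem pvTrail_cons_nil (c : Char) (u : List Char) (h : pvTrail (c :: u) = []) :
    pvTrail u = [] := by
  have h1 : (u.reverse ++ [c]).takeWhile pvNsp = [] := by
    have := congrArg List.reverse h
    simpa [pvTrail] using this
  have := pvTw_append_nil h1
  simp [pvTrail, this]

theorem pvWAPP (u w : List Char) (hu : pvTrail u = []) (hw : w ≠ [])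
    (hwa : ∀ c ∈ w, pvNsp c = true) : pvWords (u ++ w) = pvWords u ++ [w] := by
  induction u using pvWords.induct with
  | case1 =>
      rw [List.nil_append, pvWords_nil, List.nil_append, pvWord_of_all w hw hwa]
  | case2 c u h ih =>
      rw [List.cons_append, pvWords_cons_sp _ _ h, pvWords_cons_sp _ _ h]
      exact ih (pvTrail_cons_nil c u hu)
  | case3 c u h ih =>
      have hc : PySem.Chars.isspace c = false := by simpa using h
      have hcn : pvNsp c = true := by simp [pvNsp, hc]
      have h1 : (u.reverse ++ [c]).takeWhile pvNsp = [] := by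
        have := congrArg List.reverse hu
        simpa [pvTrail] using this
      have h2 : u.reverse.takeWhile pvNsp = [] := pvTw_append_nil h1
      have hune : u ≠ [] := by
        intro he; subst he
        simp [hcn] at h1
      have hdu : u.dropWhile pvNsp ≠ [] := by
        intro he
        have hall : ∀ x ∈ u, pvNsp x = true := List.dropWhile_eq_nil_iff.1 he
        have : u.reverse.takeWhile pvNsp = u.reverse := by
          have h3 : u.reverse.dropWhile pvNsp = [] :=
            List.dropWhile_eq_nil_iff.2 (fun x hx => hall x (List.mem_reverse.1 hx))
          have h4 := List.takeWhile_append_dropWhile (p := pvNsp) (l := u.reverse)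
          rw [h3] at h4; simpa using h4
        rw [h2] at this
        exact hune (by simpa using congrArg List.reverse this.symm)
      have hlen : ¬ ((u.takeWhile pvNsp).length = u.length) := by
        intro hlen
        have hpre : u.takeWhile pvNsp <+: u := List.takeWhile_prefix _
        have heq : u.takeWhile pvNsp = u := List.IsPrefix.eq_of_length hpre hlen
        have h4 := List.takeWhile_append_dropWhile (p := pvNsp) (l := u)
        rw [heq] at h4
        exact hdu (List.append_cancel_left (h4.trans (List.append_nil u).symm))
      have htrdu : pvTrail (u.dropWhile pvNsp) = [] := by
        obtain ⟨pre, hpre⟩ : u.dropWhile pvNsp <:+ u := List.dropWhile_suffix _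
        have : u.reverse = (u.dropWhile pvNsp).reverse ++ pre.reverse := by
          rw [← List.reverse_append, hpre]
        rw [this] at h2
        have := pvTw_append_nil h2
        simp [pvTrail, this]
      rw [List.cons_append, pvWords_cons_ns _ _ hc, pvWords_cons_ns _ _ hc]
      have htw : (u ++ w).takeWhile pvNsp = u.takeWhile pvNsp := by
        rw [List.takeWhile_append, if_neg hlen]
      obtain ⟨d, r, hd⟩ : ∃ d r, u.dropWhile pvNsp = d :: r := by
        rcases he : u.dropWhile pvNsp with _ | ⟨d, r⟩
        · exact absurd he hdu
        · exact ⟨d, r, rfl⟩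
      have hdw : (u ++ w).dropWhile pvNsp = u.dropWhile pvNsp ++ w := by
        rw [List.dropWhile_append, if_neg (by rw [hd]; simp)]
      rw [htw, hdw, ih htrdu]
      simp

theorem pvSplitTrail (s : List Char) : pvDropTrail s ++ pvTrail s = s := by
  simp [pvDropTrail, pvTrail, ← List.reverse_append, List.takeWhile_append_dropWhile]

theorem pvWTR (s : List Char) :
    pvWords s = pvWords (pvDropTrail s) ++ (if pvTrail s = [] then [] else [pvTrail s]) := by
  by_cases h : pvTrail s = []
  · have hds : pvDropTrail s = s := by
      have h2 := pvSplitTrail s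
      rw [h] at h2; simpa using h2
    rw [h, hds]; simp
  · have h2 : pvTrail (pvDropTrail s) = [] := by
      have : (pvDropTrail s).reverse.takeWhile pvNsp = [] := by
        rw [pvDropTrail, List.reverse_reverse]
        rcases hd : s.reverse.dropWhile pvNsp with _ | ⟨d, r⟩
        · simp
        · have := pvHeadDrop pvNsp _ _ _ hd
          simp [this]
      simp [pvTrail, this]
    have h3 : ∀ c ∈ pvTrail s, pvNsp c = true := by
      intro c hc
      have : c ∈ s.reverse.takeWhile pvNsp := by
        rw [pvTrail] at hc; exact List.mem_reverse.1 hc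
      exact List.all_eq_true.mp List.all_takeWhile c this
    conv_lhs => rw [← pvSplitTrail s]
    rw [pvWAPP _ _ h2 h h3, if_neg h]

-- collapsed key facts used by the loop invariant
theorem pvPK1 (s : List Char) :
    (if (pvTrail s).isEmpty then (pvWords (pvDropTrail s)).getLastD [] else pvTrail s)
      = (pvWords s).getLastD [] := by
  by_cases h : pvTrail s = []
  · rw [pvWTR s, if_pos h, h]
    simp
  · rw [pvWTR s, if_neg h, if_neg (by simpa [List.isEmpty_iff] using h)]
    simp

theorem pvGetLastD_ne (L : List (List Char)) (hL : ∀ w ∈ L, w ≠ []) :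
    L.getLastD [] = [] ↔ L = [] := by
  cases hl : L.getLast? with
  | none => simp [List.getLastD_eq_getLast?, List.getLast?_eq_none_iff.1 hl]
  | some a =>
      have ha : a ∈ L := List.mem_of_getLast? hl
      have hne : L ≠ [] := by rintro rfl; simp at ha
      simp [List.getLastD_eq_getLast?, hl, hL a ha, hne]

theorem pvPK2 (s : List Char) : (pvWords s).getLastD [] = [] ↔ pvWords s = [] :=
  pvGetLastD_ne _ (pvWords_ne_nil s)

-- ---- strip lemmas ----
theorem pvWords_lstrip (s : List Char) : pvWords (PySem.Chars.lstrip s) = pvWords s := by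
  induction s with
  | nil => simp [PySem.Chars.lstrip]
  | cons c t ih =>
      by_cases hc : PySem.Chars.isspace c = true
      · rw [PySem.Chars.lstrip, List.dropWhile_cons_of_pos hc, pvWords_cons_sp _ _ hc]
        exact ih
      · rw [PySem.Chars.lstrip, List.dropWhile_cons_of_neg (by simpa using hc)]

theorem pvWords_rstrip (s : List Char) : pvWords (PySem.Chars.rstrip s) = pvWords s := by
  have hsplit : PySem.Chars.rstrip s ++ (s.reverse.takeWhile PySem.Chars.isspace).reverse = s := by
    rw [PySem.Chars.rstrip, ← List.reverse_append, List.takeWhile_append_dropWhile,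
      List.reverse_reverse]
  have hsp : ∀ c ∈ (s.reverse.takeWhile PySem.Chars.isspace).reverse, PySem.Chars.isspace c = true :=
    fun c hc => List.all_eq_true.mp List.all_takeWhile c (List.mem_reverse.1 hc)
  conv_rhs => rw [← hsplit]
  rw [pvWords_append_sp _ _ hsp]

theorem pvWords_strip (s : List Char) : pvWords (PySem.Chars.strip s) = pvWords s := by
  rw [PySem.Chars.strip, pvWords_rstrip, pvWords_lstrip]

theorem pvRstrip_nil_iff (v : List Char) :
    PySem.Chars.rstrip v = [] ↔ ∀ c ∈ v, PySem.Chars.isspace c = true := by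
  rw [PySem.Chars.rstrip]
  constructor
  · intro h c hc
    have h2 : v.reverse.dropWhile PySem.Chars.isspace = [] := by
      simpa using congrArg List.reverse h
    exact List.dropWhile_eq_nil_iff.1 h2 c (List.mem_reverse.2 hc)
  · intro h
    rw [List.dropWhile_eq_nil_iff.2 (fun x hx => h x (List.mem_reverse.1 hx))]
    simp

theorem pvStrip_nil_iff (s : List Char) : PySem.Chars.strip s = [] ↔ pvWords s = [] := by
  rw [pvWords_nil_iff, PySem.Chars.strip, pvRstrip_nil_iff]
  constructor
  · intro h c hc
    have hsplit : s.takeWhile PySem.Chars.isspace ++ PySem.Chars.lstrip s = s := by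
      rw [PySem.Chars.lstrip, List.takeWhile_append_dropWhile]
    rw [← hsplit] at hc
    rcases List.mem_append.1 hc with h1 | h1
    · exact List.all_eq_true.mp List.all_takeWhile c h1
    · exact h c h1
  · intro h c hc
    have : PySem.Chars.lstrip s <:+ s := by
      rw [PySem.Chars.lstrip]; exact List.dropWhile_suffix _
    exact h c (this.mem hc)

-- ---- pyGet? at -1 ----
theorem pvPyGetLast (xs : List (List Char)) (h : xs ≠ []) :
    (PySem.List.pyGet? xs (-1)).getD [] = xs.getLastD [] := by
  cases xs with
  | nil => simp at h
  | cons a l =>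
      have hlen : (a :: l).length = l.length + 1 := by simp
      simp only [PySem.List.pyGet?, PySem.List.pyIdx?, hlen]
      rw [if_neg (by omega), if_pos (by push_cast; omega)]
      simp only [Option.bind_some]
      rw [List.getLastD_eq_getLast?, List.getLast?_eq_getElem?]
      simp

-- ---- A-side closed form ----
theorem pvAList (l : List (List Char)) (acc : List (List Char)) :
    ((l.map PySem.Chars.strip).filter (fun p => !p.isEmpty)).foldl (fun acc param =>
      let p := PySem.Chars.strip param
      if p.isEmpty then acc
      else acc ++ [(PySem.List.pyGet? (PySem.Chars.split₀ p) (-1)).getD []]) acc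
      = acc ++ l.flatMap pvF := by
  induction l generalizing acc with
  | nil => simp
  | cons p l ih =>
      rw [List.map_cons, List.filter_cons]
      by_cases hp : (PySem.Chars.strip p).isEmpty = true
      · have hpn : PySem.Chars.strip p = [] := List.isEmpty_iff.1 hp
        have hw : pvWords p = [] := (pvStrip_nil_iff p).1 hpn
        rw [if_neg (by simp [hp]), ih, List.flatMap_cons]
        simp [pvF, hw]
      · have hpn : PySem.Chars.strip p ≠ [] := by
          intro he; exact hp (by simp [he])
        have hw : pvWords p ≠ [] := fun he => hpn ((pvStrip_nil_iff p).2 he)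
        have hss : pvWords (PySem.Chars.strip (PySem.Chars.strip p)) = pvWords p := by
          rw [pvWords_strip, pvWords_strip]
        have hssn : ¬ (PySem.Chars.strip (PySem.Chars.strip p)).isEmpty = true := by
          intro he
          apply hw
          rw [← pvWords_strip p]
          exact (pvStrip_nil_iff _).1 (List.isEmpty_iff.1 he)
        rw [if_pos (by simp [hp]), List.foldl_cons]
        simp only [hssn]
        rw [ih, List.flatMap_cons]
        have hval : (PySem.List.pyGet? (PySem.Chars.split₀ (PySem.Chars.strip (PySem.Chars.strip p))) (-1)).getD []
            = (pvWords p).getLastD [] := by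
          rw [pvSplit0_eq, hss, pvPyGetLast _ hw]
        rw [hval]
        simp [pvF, hw]

theorem pvSplitAcc (s : List Char) (done : List (List Char)) (cur : List Char) (depth : Int) :
    pvSplitLoop s done cur depth =
      (done ++ (pvSplitLoop s [] cur depth).1, (pvSplitLoop s [] cur depth).2) := by
  induction s generalizing done cur depth with
  | nil => simp [pvSplitLoop]
  | cons c rest ih =>
      rw [pvSplitLoop, pvSplitLoop]
      by_cases h : c = ',' ∧ (if c = '<' then depth + 1 else if c = '>' then depth - 1 else depth) = 0
      · rw [if_pos h, if_pos h]
        simp only [List.nil_append]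
        rw [ih, ih [cur]]
        simp
      · rw [if_neg h, if_neg h, ih]

-- ---- main loop invariant ----
theorem pvE (s : List Char) : ∀ (depth : Int) (curA : List Char) (out : List (List Char)),
    pvAltLoop s depth (pvTrail curA) ((pvWords (pvDropTrail curA)).getLastD []) out
      = out ++ (((pvSplitLoop s [] curA depth).1 ++ [(pvSplitLoop s [] curA depth).2]).flatMap pvF) := by
  induction s with
  | nil =>
      intro depth curA out
      rw [pvAltLoop, pvSplitLoop]
      simp only []
      rw [pvPK1]
      by_cases h : pvWords curA = []
      · rw [if_pos (by simp [h])]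
        simp [pvF, h]
      · rw [if_neg (by simpa [List.isEmpty_iff] using (fun he => h ((pvPK2 curA).1 he)))]
        simp [pvF, h]
  | cons c rest ih =>
      intro depth curA out
      rw [pvAltLoop, pvSplitLoop]
      simp only []
      by_cases hcd : c = ',' ∧ (if c = '<' then depth + 1 else if c = '>' then depth - 1 else depth) = 0
      · rw [if_pos hcd, if_pos hcd]
        have hflush : (if (if (pvTrail curA).isEmpty then (pvWords (pvDropTrail curA)).getLastD [] else pvTrail curA).isEmpty
              then out else out ++ [if (pvTrail curA).isEmpty then (pvWords (pvDropTrail curA)).getLastD [] else pvTrail curA])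
            = out ++ pvF curA := by
          rw [pvPK1]
          by_cases h : pvWords curA = []
          · rw [if_pos (by simp [h])]; simp [pvF, h]
          · rw [if_neg (by simpa [List.isEmpty_iff] using (fun he => h ((pvPK2 curA).1 he)))]
            simp [pvF, h]
        rw [hflush]
        have h0 := ih (if c = '<' then depth + 1 else if c = '>' then depth - 1 else depth) [] (out ++ pvF curA)
        simp only [pvTrail, pvDropTrail, List.reverse_nil, List.takeWhile_nil, List.dropWhile_nil,
          pvWords_nil, List.getLastD_nil] at h0
        rw [h0]
        simp only [List.nil_append]
        rw [pvSplitAcc rest [curA]]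
        simp
      · rw [if_neg hcd, if_neg hcd]
        by_cases hsp : PySem.Chars.isspace c = true
        · rw [if_pos hsp]
          have hT1 : pvTrail (curA ++ [c]) = [] := by
            simp [pvTrail, pvNsp, hsp]
          have hT2 : pvDropTrail (curA ++ [c]) = curA ++ [c] := by
            simp [pvDropTrail, pvNsp, hsp]
          have h0 := ih (if c = '<' then depth + 1 else if c = '>' then depth - 1 else depth) (curA ++ [c]) out
          rw [hT1, hT2, pvWords_append_sp curA [c] (by simpa using hsp)] at h0
          rw [← pvPK1] at h0
          exact h0
        · rw [if_neg hsp]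
          have hsp' : PySem.Chars.isspace c = false := by simpa using hsp
          have hT3 : pvTrail (curA ++ [c]) = pvTrail curA ++ [c] := by
            simp [pvTrail, pvNsp, hsp']
          have hT4 : pvDropTrail (curA ++ [c]) = pvDropTrail curA := by
            simp [pvDropTrail, pvNsp, hsp']
          have h0 := ih (if c = '<' then depth + 1 else if c = '>' then depth - 1 else depth) (curA ++ [c]) out
          rw [hT3, hT4] at h0
          exact h0

theorem pvCore (s : List Char) : pvShortenA (pvSplitParams s) = pvAltLoop s 0 [] [] [] := by
  have h := pvE s 0 [] []
  simp only [pvTrail, pvDropTrail, List.reverse_nil, List.takeWhile_nil, List.dropWhile_nil,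
    pvWords_nil, List.getLastD_nil, List.nil_append] at h
  rw [pvShortenA, pvSplitParams, h]
  exact pvAList _ _

-- ===== VERDICT (by name: the statement is the Claim_ definition above) =====
theorem shorten_params_spec : Claim_equal_shorten_params := by
  intro line _
  unfold Spec_shorten_params shorten_params shorten_params_alt
  simp only [pvCore]
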